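-- pv_equiv track=rewrite | github.com/LivInTheLookingGlass/Thue-Morse | code/pn_d05.py | xor_in_n
-- ===== SOURCE A (Python) =====
-- from math import ceil, log
--
-- def xor_in_n(a, b, n):
--     if min(a, b) < 1:
--         return max(a, b)
--     res = 0
--     ni = 1
--     for _ in range(ceil(log(max(a, b), n)) + 1):
--         res += (((a // ni) - (b // ni)) % n) * ni
--         ni *= n
--     return res
-- ===== SOURCE B (Python) =====
-- def _digits(a, n):
--     ds = []
--     while a > 0:
--         a, d = divmod(a, n)
--         ds.append(d)
--     return ds
--
-- def xor_in_n(a, b, n):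
--     if min(a, b) < 1:
--         return max(a, b)
--     da = _digits(a, n)
--     db = _digits(b, n)
--     while len(da) < len(db):
--         da.append(0)
--     while len(db) < len(da):
--         db.append(0)
--     return sum(((x - y) % n) * n ** i for i, (x, y) in enumerate(zip(da, db)))
-- ===== Notes on version B (the rewrite author's own statement) =====
-- stated objective: simpler
-- what changed: B drops the float-log-bounded loop over // and % slices and instead builds the base-n digit lists of a and b with repeated divmod, zero-pads the shorter, and recombines sum(((da-db)%n)*n**i) digit by digit; Pre_ excludes min(a,b)>=1 with n<=1, where A raises inside math.log.
import Mathlib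
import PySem

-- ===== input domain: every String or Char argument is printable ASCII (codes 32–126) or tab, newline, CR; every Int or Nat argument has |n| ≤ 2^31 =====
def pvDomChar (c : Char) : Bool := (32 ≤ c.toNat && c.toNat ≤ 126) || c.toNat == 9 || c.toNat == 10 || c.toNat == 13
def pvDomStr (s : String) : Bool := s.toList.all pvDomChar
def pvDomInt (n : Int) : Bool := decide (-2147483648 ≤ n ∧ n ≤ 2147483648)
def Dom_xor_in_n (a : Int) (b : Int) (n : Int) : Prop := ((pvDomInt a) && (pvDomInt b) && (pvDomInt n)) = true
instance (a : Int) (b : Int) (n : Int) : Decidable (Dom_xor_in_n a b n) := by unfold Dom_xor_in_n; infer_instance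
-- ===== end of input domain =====

-- B replaces A's float-log-bounded //-and-% slicing loop by two explicit base-n digit lists
-- built with divmod, zero-padded and recombined digit by digit (objective: simpler, no float log).

-- ===== PORT A =====
-- Hand port of `ceil(log(max(a,b), n))`: Python computes this with a float log; it is ported as the
-- exact integer ceiling logarithm (Nat.clog). Within the admitted domain (1 ≤ m ≤ 2^31, 2 ≤ n) a
-- float deviation can only move the iteration count past the last nonzero base-n digit, where every
-- loop term is 0, so the loop's result is exact.
def pyCeilLog (n m : Int) : Int := (Nat.clog n.toNat m.toNat : Int)

-- `for _ in range(t)` threading the state (res, ni)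
def xorLoopA (a b n : Int) : Nat → Int × Int
  | 0 => (0, 1)
  | t + 1 =>
    let p := xorLoopA a b n t
    (p.1 + PySem.Int.mod (PySem.Int.floordiv a p.2 - PySem.Int.floordiv b p.2) n * p.2, p.2 * n)

def xor_in_n (a : Int) (b : Int) (n : Int) : Int :=
  if min a b < 1 then max a b
  else (xorLoopA a b n (pyCeilLog n (max a b) + 1).toNat).1

-- ===== PORT B =====
-- `while a > 0: a, d = divmod(a, n); ds.append(d)`; the `2 ≤ n` test only makes the recursion
-- total in Lean (B's Python does not terminate there; such inputs are outside Pre_).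
-- used by digitsB's termination proof
theorem pv_ediv_lt_self (a n : Int) (ha : 0 < a) (hn : 2 ≤ n) : a / n < a := by
  rw [Int.ediv_lt_iff_lt_mul (by omega)]; nlinarith

def digitsB (n a : Int) : List Int :=
  if h : 0 < a ∧ 2 ≤ n then
    PySem.Int.mod a n :: digitsB n (PySem.Int.floordiv a n)
  else []
termination_by a.toNat
decreasing_by
  have h2 : (0:Int) < n := by omega
  rw [PySem.Int.floordiv_eq_ediv_of_pos h2]
  have := pv_ediv_lt_self a n h.1 (by omega)
  have h0 : (0:Int) ≤ a / n := Int.ediv_nonneg (by omega) (by omega)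
  omega

def xor_in_n_alt (a : Int) (b : Int) (n : Int) : Int :=
  if min a b < 1 then max a b
  else
    let da := digitsB n a
    let db := digitsB n b
    let da' := da ++ List.replicate (db.length - da.length) (0 : Int)
    let db' := db ++ List.replicate (da'.length - db.length) (0 : Int)
    ((da'.zip db').zipIdx.foldl
      (fun res p => res + PySem.Int.mod (p.1.1 - p.1.2) n * n ^ p.2) 0)

-- ===== PRECONDITION & SPEC =====
-- Pre_ excludes min(a,b) ≥ 1 with n ≤ 1, where A raises (ZeroDivisionError for n = 1,
-- ValueError for n ≤ 0, inside math.log).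
def Pre_xor_in_n (a : Int) (b : Int) (n : Int) : Prop := min a b < 1 ∨ 2 ≤ n
instance (a : Int) (b : Int) (n : Int) : Decidable (Pre_xor_in_n a b n) := by
  unfold Pre_xor_in_n; infer_instance

def pvWitness_xor_in_n : Int × Int × Int := (6, 5, 2)

def Spec_xor_in_n (a : Int) (b : Int) (n : Int) (out : Int) : Prop := out = xor_in_n_alt a b n
instance (a : Int) (b : Int) (n : Int) (out : Int) : Decidable (Spec_xor_in_n a b n out) := by
  unfold Spec_xor_in_n; infer_instance

-- ===== CLAIM (what is proved, stated in full; the proofs are below) =====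
def Claim_equal_xor_in_n : Prop := ∀ (a : Int) (b : Int) (n : Int), Dom_xor_in_n a b n → Pre_xor_in_n a b n → Spec_xor_in_n a b n (xor_in_n a b n)

-- ===== LEMMAS AND PROOFS =====

-- canonical value: digit-wise (a - b) mod n recombined, truncated after t digits
def canonS (a b n : Int) : Nat → Int
  | 0 => 0
  | t + 1 => canonS a b n t + (a / n ^ t - b / n ^ t) % n * n ^ t

theorem xorLoopA_eq_canon (a b n : Int) (hn : 2 ≤ n) (t : Nat) :
    xorLoopA a b n t = (canonS a b n t, n ^ t) := by
  induction t with
  | zero => simp [xorLoopA, canonS]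
  | succ t ih =>
    have hp : (0:Int) < n ^ t := pow_pos (by omega) t
    simp only [xorLoopA, ih, canonS,
      PySem.Int.floordiv_eq_ediv_of_pos hp, PySem.Int.mod_eq_emod_of_pos (by omega : (0:Int) < n)]
    rw [pow_succ]

theorem digitsB_getD (n : Int) (hn : 2 ≤ n) :
    ∀ (i : Nat) (a : Int), 0 ≤ a → (digitsB n a).getD i 0 = a / n ^ i % n := by
  intro i
  induction i with
  | zero =>
    intro a ha
    rw [digitsB]
    by_cases h : 0 < a ∧ 2 ≤ n
    · simp [h, PySem.Int.mod_eq_emod_of_pos (by omega : (0:Int) < n)]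
    · have : a = 0 := by omega
      simp [h, this]
  | succ i ih =>
    intro a ha
    rw [digitsB]
    by_cases h : 0 < a ∧ 2 ≤ n
    · have h2 : (0:Int) < n := by omega
      have hq : (0:Int) ≤ a / n := Int.ediv_nonneg ha (by omega)
      rw [dif_pos h, List.getD_cons_succ, PySem.Int.floordiv_eq_ediv_of_pos h2, ih _ hq,
        Int.ediv_ediv_of_nonneg (by omega : (0:Int) ≤ n),
        show n * n ^ i = n ^ (i + 1) by ring]
    · have ha0 : a = 0 := by omega
      subst ha0
      rw [dif_neg h]
      simp

theorem digitsB_lt (n : Int) (hn : 2 ≤ n) :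
    ∀ (N : Nat) (a : Int), 0 ≤ a → a.toNat ≤ N → a < n ^ (digitsB n a).length := by
  intro N
  induction N with
  | zero =>
    intro a ha hN
    have ha0 : a = 0 := by omega
    subst ha0
    rw [digitsB, dif_neg (by omega)]
    norm_num
  | succ N ih =>
    intro a ha hN
    rw [digitsB]
    by_cases h : 0 < a ∧ 2 ≤ n
    · have h2 : (0:Int) < n := by omega
      rw [dif_pos h, PySem.Int.floordiv_eq_ediv_of_pos h2]
      have hq0 : (0:Int) ≤ a / n := Int.ediv_nonneg ha (by omega)
      have hlt : a / n < a := pv_ediv_lt_self a n h.1 hn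
      have hrec : a / n < n ^ (digitsB n (a / n)).length := ih (a / n) hq0 (by omega)
      simp only [List.length_cons, pow_succ]
      have hdm : n * (a / n) + a % n = a := Int.ediv_add_emod a n
      have hm : a % n < n := Int.emod_lt_of_pos a h2
      nlinarith [hrec, hm, hdm, h2]
    · have ha0 : a = 0 := by omega
      subst ha0
      rw [dif_neg h]
      norm_num

theorem digitsB_len_le (n : Int) (hn : 2 ≤ n) :
    ∀ (N : Nat) (a : Int) (k : Nat), 0 ≤ a → a.toNat ≤ N → a < n ^ k →
      (digitsB n a).length ≤ k := by
  intro N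
  induction N with
  | zero =>
    intro a k ha hN hk
    have ha0 : a = 0 := by omega
    subst ha0
    rw [digitsB, dif_neg (by omega)]
    simp
  | succ N ih =>
    intro a k ha hN hk
    rw [digitsB]
    by_cases h : 0 < a ∧ 2 ≤ n
    · have h2 : (0:Int) < n := by omega
      rw [dif_pos h, PySem.Int.floordiv_eq_ediv_of_pos h2]
      cases k with
      | zero => simp at hk; omega
      | succ k =>
        have hq0 : (0:Int) ≤ a / n := Int.ediv_nonneg ha (by omega)
        have hlt : a / n < a := pv_ediv_lt_self a n h.1 hn
        have hqk : a / n < n ^ k := by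
          rw [Int.ediv_lt_iff_lt_mul h2]
          calc a < n ^ (k + 1) := hk
            _ = n ^ k * n := by ring
        have := ih (a / n) k hq0 (by omega) hqk
        simp only [List.length_cons]
        omega
    · rw [dif_neg h]; simp

theorem getD_append_replicate_zero (xs : List Int) (k i : Nat) :
    (xs ++ List.replicate k (0 : Int)).getD i 0 = xs.getD i 0 := by
  have hlen : (xs ++ List.replicate k (0:Int)).length = xs.length + k := by simp
  by_cases h : i < xs.length
  · have h1 : (xs ++ List.replicate k (0:Int)).getD i 0
        = (xs ++ List.replicate k (0:Int))[i]'(by omega) := List.getD_eq_getElem _ _ (by omega)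
    have h2 : xs.getD i 0 = xs[i]'h := List.getD_eq_getElem _ _ h
    rw [h1, h2, List.getElem_append_left h]
  · have h2 : xs.getD i 0 = 0 := List.getD_eq_default _ _ (by omega)
    rw [h2]
    by_cases hk : i < xs.length + k
    · have h1 : (xs ++ List.replicate k (0:Int)).getD i 0
          = (xs ++ List.replicate k (0:Int))[i]'(by omega) := List.getD_eq_getElem _ _ (by omega)
      rw [h1, List.getElem_append_right (by omega)]
      simp
    · exact List.getD_eq_default _ _ (by omega)

theorem foldB_eq_sum (n : Int) :
    ∀ (u v : List Int) (k : Nat) (acc : Int), u.length = v.length →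
      ((u.zip v).zipIdx k).foldl
        (fun res p => res + PySem.Int.mod (p.1.1 - p.1.2) n * n ^ p.2) acc
      = acc + ∑ i ∈ Finset.range u.length,
          PySem.Int.mod (u.getD i 0 - v.getD i 0) n * n ^ (k + i) := by
  intro u
  induction u with
  | nil => intro v k acc h; simp
  | cons x u ih =>
    intro v k acc h
    cases v with
    | nil => simp at h
    | cons y v =>
      simp only [List.zip_cons_cons, List.zipIdx_cons, List.foldl_cons]
      rw [ih v (k + 1) _ (by simpa using h)]
      rw [List.length_cons, Finset.sum_range_succ']
      simp only [List.getD_cons_succ, List.getD_cons_zero]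
      have : ∀ i, k + 1 + i = k + (i + 1) := by omega
      simp only [this]
      ring

theorem canonS_eq_sum (a b n : Int) (t : Nat) :
    canonS a b n t = ∑ i ∈ Finset.range t, (a / n ^ i - b / n ^ i) % n * n ^ i := by
  induction t with
  | zero => simp [canonS]
  | succ t ih => rw [canonS, ih, Finset.sum_range_succ]

theorem xor_in_n_eq_alt (a b n : Int) (ha : 1 ≤ a) (hb : 1 ≤ b) (hn : 2 ≤ n) :
    xor_in_n a b n = xor_in_n_alt a b n := by
  have hmin : ¬ (min a b < 1) := by omega
  have h2 : (0:Int) < n := by omega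
  simp only [xor_in_n, xor_in_n_alt, if_neg hmin, xorLoopA_eq_canon a b n hn]
  set t := (pyCeilLog n (max a b) + 1).toNat with ht
  set da := digitsB n a with hda
  set db := digitsB n b with hdb
  set L := max da.length db.length with hL
  -- max a b < n ^ t
  have hmlt : max a b < n ^ t := by
    have hm1 : 1 ≤ max a b := by omega
    have hmn : (max a b).toNat < n.toNat ^ t := by
      calc (max a b).toNat < n.toNat ^ (Nat.log n.toNat (max a b).toNat + 1) :=
            Nat.lt_pow_succ_log_self (by omega) _
        _ ≤ n.toNat ^ t := by
            apply Nat.pow_le_pow_right (by omega)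
            have := Nat.log_le_clog n.toNat (max a b).toNat
            simp only [ht, pyCeilLog]
            omega
    have hcast : ((max a b).toNat : Int) < ((n.toNat ^ t : Nat) : Int) := by exact_mod_cast hmn
    simpa [Int.toNat_of_nonneg (by omega : (0:Int) ≤ max a b),
      Int.toNat_of_nonneg (by omega : (0:Int) ≤ n)] using hcast
  have hat : a < n ^ t := lt_of_le_of_lt (le_max_left a b) hmlt
  have hbt : b < n ^ t := lt_of_le_of_lt (le_max_right a b) hmlt
  have hla : da.length ≤ t := digitsB_len_le n hn a.toNat a t (by omega) (le_refl _) hat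
  have hlb : db.length ≤ t := digitsB_len_le n hn b.toNat b t (by omega) (le_refl _) hbt
  have hLt : L ≤ t := by omega
  have hlen1 : (da ++ List.replicate (db.length - da.length) (0:Int)).length = L := by
    simp [hL]; omega
  rw [foldB_eq_sum n _ _ 0 0 (by simp; omega)]
  rw [hlen1]
  simp only [getD_append_replicate_zero, zero_add, canonS_eq_sum]
  -- B's terms equal the canonical terms
  have hterm : ∀ i : Nat, PySem.Int.mod (da.getD i 0 - db.getD i 0) n * n ^ i
      = (a / n ^ i - b / n ^ i) % n * n ^ i := by
    intro i
    rw [PySem.Int.mod_eq_emod_of_pos h2, hda, hdb,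
      digitsB_getD n hn i a (by omega), digitsB_getD n hn i b (by omega),
      ← Int.sub_emod]
  simp only [hterm]
  -- extend the range-L sum to range-t: the extra terms vanish
  refine (Finset.sum_subset (by intro x hx; simp only [Finset.mem_range] at *; omega) ?_).symm
  intro i hi hiL
  simp only [Finset.mem_range] at hi hiL
  have hiL' : L ≤ i := by omega
  have hza : a / n ^ i = 0 := by
    apply Int.ediv_eq_zero_of_lt (by omega)
    calc a < n ^ da.length := digitsB_lt n hn a.toNat a (by omega) (le_refl _)
      _ ≤ n ^ i := pow_le_pow_right₀ (by omega) (by omega)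
  have hzb : b / n ^ i = 0 := by
    apply Int.ediv_eq_zero_of_lt (by omega)
    calc b < n ^ db.length := digitsB_lt n hn b.toNat b (by omega) (le_refl _)
      _ ≤ n ^ i := pow_le_pow_right₀ (by omega) (by omega)
  rw [hza, hzb]
  norm_num

-- ===== VERDICT (by name: the statement is the Claim_ definition above) =====
theorem xor_in_n_spec : Claim_equal_xor_in_n := by
  intro a b n _ hpre
  unfold Spec_xor_in_n
  rcases hpre with h | h
  · rw [xor_in_n, if_pos h, xor_in_n_alt, if_pos h]
  · by_cases hmin : min a b < 1
    · rw [xor_in_n, if_pos hmin, xor_in_n_alt, if_pos hmin]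
    · exact xor_in_n_eq_alt a b n (by omega) (by omega) h
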